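-- pv_equiv track=rewrite | github.com/jiahuiiiii/Coding-Challenge | python/feb12.py | num_type
-- ===== SOURCE A (Python) =====
-- def num_type(num):
--     factors = []
--     for i in range(1, num):
--         if num % i == 0:
--             factors.append(i)
--     sum_ = sum(factors)
--     if sum_ == num:
--         return 'Perfect'
--     factors.clear()
--     for j in range(1, sum_):
--         if sum_ % j == 0:
--             factors.append(j)
--     if sum(factors) == num:
--         return 'Amicable'
--     return 'Neither'
-- ===== SOURCE B (Python) =====
-- def num_type(num):
--     def proper_sum(n):
--         # sum of proper divisors via sqrt trial division
--         if n < 2: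
--             return 0
--         total = 1
--         i = 2
--         while i * i <= n:
--             if n % i == 0:
--                 total += i
--                 q = n // i
--                 if q != i:
--                     total += q
--             i += 1
--         return total
--
--     s = proper_sum(num)
--     if s == num:
--         return 'Perfect'
--     if proper_sum(s) == num:
--         return 'Amicable'
--     return 'Neither'
-- ===== Notes on version B (the rewrite author's own statement) =====
-- stated objective: faster
-- what changed: Replaces the two O(n) scans over all candidates below n with a shared proper-divisor-sum helper that trial-divides only up to sqrt(n), pairing each small divisor d with n//d.
import Mathlib
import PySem

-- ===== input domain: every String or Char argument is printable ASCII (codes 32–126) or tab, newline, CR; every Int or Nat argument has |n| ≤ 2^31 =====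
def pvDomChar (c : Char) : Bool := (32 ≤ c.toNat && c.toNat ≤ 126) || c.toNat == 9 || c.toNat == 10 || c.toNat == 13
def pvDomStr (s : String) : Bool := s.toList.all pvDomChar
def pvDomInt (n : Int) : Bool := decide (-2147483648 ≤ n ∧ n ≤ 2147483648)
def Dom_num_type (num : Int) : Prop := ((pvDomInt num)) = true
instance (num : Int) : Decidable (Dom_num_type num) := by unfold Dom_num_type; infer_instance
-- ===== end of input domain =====

-- B replaces A's two O(n) scans by a shared proper-divisor-sum helper that trial-divides only up to sqrt(n) (faster, asymptotic).

-- ===== PORT A =====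
def num_type (num : Int) : String :=
  let factors := (PySem.List.pyRange 1 num 1).foldl
    (fun acc i => if PySem.Int.mod num i == 0 then acc ++ [i] else acc) []
  let sum_ := factors.sum
  if sum_ == num then "Perfect"
  else
    let factors2 := (PySem.List.pyRange 1 sum_ 1).foldl
      (fun acc j => if PySem.Int.mod sum_ j == 0 then acc ++ [j] else acc) ([] : List Int)
    if factors2.sum == num then "Amicable" else "Neither"

-- ===== PORT B =====
-- while i * i <= n loop of Source B's proper_sum; values are nonneg so it is carried in Nat
def altGo (n i acc : Nat) : Nat :=
  if _h : i * i ≤ n then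
    if n % i = 0 then
      altGo n (i + 1) (acc + i + (if n / i ≠ i then n / i else 0))
    else
      altGo n (i + 1) acc
  else acc
termination_by n + 1 - i
decreasing_by
  all_goals
    have hii : i ≤ n := by
      cases i with
      | zero => omega
      | succ k => exact le_trans (Nat.le_mul_of_pos_left _ (Nat.succ_pos k)) _h
    omega

def properSumAlt (n : Int) : Int :=
  if n < 2 then 0 else (altGo n.toNat 2 1 : Int)

def num_type_alt (num : Int) : String :=
  let s := properSumAlt num
  if s == num then "Perfect"
  else if properSumAlt s == num then "Amicable"
  else "Neither"

-- ===== PRECONDITION & SPEC =====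
def Spec_num_type (num : Int) (out : String) : Prop := out = num_type_alt num
instance (num : Int) (out : String) : Decidable (Spec_num_type num out) := by unfold Spec_num_type; infer_instance

-- ===== CLAIM (what is proved, stated in full; the proofs are below) =====
def Claim_equal_num_type : Prop := ∀ (num : Int), Dom_num_type num → Spec_num_type num (num_type num)

-- ===== LEMMAS AND PROOFS =====

-- contribution of a small divisor d and its cofactor n/d
def pairF (n d : Nat) : Nat := d + (if n / d ≠ d then n / d else 0)

theorem altGo_spec (n i acc : Nat) :
    altGo n i acc = acc + ∑ d ∈ Finset.Ico i (n + 1),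
      (if d * d ≤ n ∧ n % d = 0 then pairF n d else 0) := by
  induction i, acc using altGo.induct n with
  | case1 i acc h hmod ih =>
    have hi : i ≤ n := by
      cases i with
      | zero => omega
      | succ k => exact le_trans (Nat.le_mul_of_pos_left _ (Nat.succ_pos k)) h
    simp only [dite_eq_ite] at ih
    rw [altGo, dif_pos h, if_pos hmod, ih,
      Finset.sum_eq_sum_Ico_succ_bot (by omega : i < n + 1)]
    simp [pairF, h, hmod]
    omega
  | case2 i acc h hmod ih =>
    have hi : i ≤ n := by
      cases i with
      | zero => omega
      | succ k => exact le_trans (Nat.le_mul_of_pos_left _ (Nat.succ_pos k)) h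
    rw [altGo, dif_pos h, if_neg hmod, ih,
      Finset.sum_eq_sum_Ico_succ_bot (by omega : i < n + 1)]
    simp [h, hmod]
  | case3 i acc h =>
    rw [altGo, dif_neg h]
    have : ∀ d ∈ Finset.Ico i (n + 1), (if d * d ≤ n ∧ n % d = 0 then pairF n d else 0) = 0 := by
      intro d hd
      simp only [Finset.mem_Ico] at hd
      have : ¬ d * d ≤ n := by
        intro hdd
        exact h (le_trans (Nat.mul_le_mul hd.1 hd.1) hdd)
      simp [this]
    rw [Finset.sum_congr rfl this]
    simp

theorem altGo_proper (n : Nat) (hn : 2 ≤ n) :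
    altGo n 2 1 = ∑ d ∈ n.properDivisors, d := by
  have hn0 : n ≠ 0 := by omega
  -- step 1: from the loop invariant to a filtered-divisors sum
  have hsets : Finset.filter (fun d => d * d ≤ n ∧ n % d = 0) (Finset.Ico 2 (n + 1))
      = n.divisors.filter (fun d => d * d ≤ n ∧ 2 ≤ d) := by
    ext d
    simp only [Finset.mem_filter, Finset.mem_Ico, Nat.mem_divisors]
    constructor
    · rintro ⟨⟨h2, _⟩, hdd, hmod⟩
      exact ⟨⟨Nat.dvd_iff_mod_eq_zero.mpr hmod, hn0⟩, hdd, h2⟩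
    · rintro ⟨⟨hdvd, _⟩, hdd, h2⟩
      exact ⟨⟨h2, by have := Nat.le_of_dvd (by omega) hdvd; omega⟩, hdd,
        Nat.dvd_iff_mod_eq_zero.mp hdvd⟩
  have h1 : altGo n 2 1 = 1 + ∑ d ∈ n.divisors.filter (fun d => d * d ≤ n ∧ 2 ≤ d), pairF n d := by
    rw [altGo_spec, ← Finset.sum_filter, hsets]
  -- split pairF
  have h2 : ∑ d ∈ n.divisors.filter (fun d => d * d ≤ n ∧ 2 ≤ d), pairF n d
      = (∑ d ∈ n.divisors.filter (fun d => d * d ≤ n ∧ 2 ≤ d), d)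
        + ∑ d ∈ n.divisors.filter (fun d => d * d ≤ n ∧ 2 ≤ d), (if n / d ≠ d then n / d else 0) := by
    rw [← Finset.sum_add_distrib]; rfl
  -- Part 1: small divisors including 1
  have hins1 : n.divisors.filter (fun d => d * d ≤ n)
      = insert 1 (n.divisors.filter (fun d => d * d ≤ n ∧ 2 ≤ d)) := by
    ext d
    simp only [Finset.mem_insert, Finset.mem_filter, Nat.mem_divisors]
    constructor
    · rintro ⟨⟨hdvd, _⟩, hdd⟩
      have : 0 < d := Nat.pos_of_dvd_of_pos hdvd (by omega)
      rcases Nat.lt_or_ge d 2 with h | h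
      · left; omega
      · right; exact ⟨⟨hdvd, hn0⟩, hdd, h⟩
    · rintro (rfl | ⟨⟨hdvd, _⟩, hdd, _⟩)
      · exact ⟨⟨one_dvd n, hn0⟩, by omega⟩
      · exact ⟨⟨hdvd, hn0⟩, hdd⟩
  have hp1 : ∑ d ∈ n.divisors.filter (fun d => d * d ≤ n), d
      = 1 + ∑ d ∈ n.divisors.filter (fun d => d * d ≤ n ∧ 2 ≤ d), d := by
    rw [hins1, Finset.sum_insert (by simp)]
  -- Part 2: big divisors ↔ small cofactors
  have hbij : ∑ d ∈ n.divisors.filter (fun d => ¬ d * d ≤ n), d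
      = ∑ e ∈ n.divisors.filter (fun e => e * e ≤ n ∧ n / e ≠ e), n / e := by
    apply Finset.sum_nbij' (i := fun d => n / d) (j := fun e => n / e)
    · intro d hd
      simp only [Finset.mem_filter, Nat.mem_divisors] at hd ⊢
      obtain ⟨⟨hdvd, _⟩, hdd⟩ := hd
      have hd0 : 0 < d := Nat.pos_of_dvd_of_pos hdvd (by omega)
      have hmul : d * (n / d) = n := Nat.mul_div_cancel' hdvd
      have hlt : n / d < d := by
        by_contra hge
        exact hdd (by nlinarith [Nat.le_of_not_lt hge])
      refine ⟨⟨Nat.div_dvd_of_dvd hdvd, hn0⟩, by nlinarith, ?_⟩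
      rw [Nat.div_div_self hdvd hn0]; omega
    · intro e he
      simp only [Finset.mem_filter, Nat.mem_divisors] at he ⊢
      obtain ⟨⟨hdvd, _⟩, hee, hne⟩ := he
      have he0 : 0 < e := Nat.pos_of_dvd_of_pos hdvd (by omega)
      have hmul : e * (n / e) = n := Nat.mul_div_cancel' hdvd
      have hlt : e < n / e := by
        rcases Nat.lt_or_ge e (n / e) with h | h
        · exact h
        · exact absurd (by nlinarith : n / e = e) hne
      exact ⟨⟨Nat.div_dvd_of_dvd hdvd, hn0⟩, by nlinarith⟩
    · intro d hd
      simp only [Finset.mem_filter, Nat.mem_divisors] at hd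
      exact Nat.div_div_self hd.1.1 hn0
    · intro e he
      simp only [Finset.mem_filter, Nat.mem_divisors] at he
      exact Nat.div_div_self he.1.1 hn0
    · intro d hd
      simp only [Finset.mem_filter, Nat.mem_divisors] at hd
      exact (Nat.div_div_self hd.1.1 hn0).symm
  -- the cofactor-sum target set = insert 1 (the ite-sum set)
  have hins2 : n.divisors.filter (fun e => e * e ≤ n ∧ n / e ≠ e)
      = insert 1 (n.divisors.filter (fun e => (e * e ≤ n ∧ 2 ≤ e) ∧ n / e ≠ e)) := by
    ext e
    simp only [Finset.mem_insert, Finset.mem_filter, Nat.mem_divisors]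
    constructor
    · rintro ⟨⟨hdvd, _⟩, hee, hne⟩
      have : 0 < e := Nat.pos_of_dvd_of_pos hdvd (by omega)
      rcases Nat.lt_or_ge e 2 with h | h
      · left; omega
      · right; exact ⟨⟨hdvd, hn0⟩, ⟨hee, h⟩, hne⟩
    · rintro (rfl | ⟨⟨hdvd, _⟩, ⟨hee, _⟩, hne⟩)
      · exact ⟨⟨one_dvd n, hn0⟩, by omega, by simpa using (by omega : n ≠ 1)⟩
      · exact ⟨⟨hdvd, hn0⟩, hee, hne⟩
  have hp2 : ∑ e ∈ n.divisors.filter (fun e => e * e ≤ n ∧ n / e ≠ e), n / e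
      = n + ∑ d ∈ n.divisors.filter (fun d => d * d ≤ n ∧ 2 ≤ d), (if n / d ≠ d then n / d else 0) := by
    rw [hins2, Finset.sum_insert (by simp), Nat.div_one]
    congr 1
    rw [← Finset.sum_filter, Finset.filter_filter]
  -- total over all divisors
  have htot : ∑ d ∈ n.divisors, d
      = (∑ d ∈ n.divisors.filter (fun d => d * d ≤ n), d)
        + ∑ d ∈ n.divisors.filter (fun d => ¬ d * d ≤ n), d :=
    (Finset.sum_filter_add_sum_filter_not _ _ _).symm
  have hproper : ∑ d ∈ n.divisors, d = (∑ d ∈ n.properDivisors, d) + n :=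
    Nat.sum_divisors_eq_sum_properDivisors_add_self
  omega

theorem sum_filter_map_range (m : Nat) (p : Nat → Bool) (f : Nat → Int) :
    ((((List.range m).filter p).map f).sum)
      = ∑ k ∈ Finset.range m, (if p k then f k else 0) := by
  induction m with
  | zero => simp
  | succ m ih =>
    rw [List.range_succ, List.filter_append, List.map_append, List.sum_append, ih,
      Finset.sum_range_succ]
    by_cases h : p m <;> simp [h]

theorem rangeSum_proper (N : Nat) (h : 1 ≤ N) :
    ∑ k ∈ Finset.range (N - 1), (if N % (k + 1) = 0 then (k + 1) else 0)
      = ∑ d ∈ N.properDivisors, d := by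
  have h1 : ∑ d ∈ Finset.Ico 1 N, (if N % d = 0 then d else 0)
      = ∑ k ∈ Finset.range (N - 1), (if N % (1 + k) = 0 then (1 + k) else 0) := by
    rw [Finset.sum_Ico_eq_sum_range]
  have h2 : Finset.filter (fun d => N % d = 0) (Finset.Ico 1 N) = N.properDivisors := by
    ext d
    simp only [Finset.mem_filter, Finset.mem_Ico, Nat.mem_properDivisors]
    constructor
    · rintro ⟨⟨h1d, h2d⟩, hm⟩
      exact ⟨Nat.dvd_iff_mod_eq_zero.mpr hm, h2d⟩
    · rintro ⟨hdvd, hlt⟩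
      have hd0 : d ≠ 0 := by rintro rfl; simp at hdvd; omega
      exact ⟨⟨by omega, hlt⟩, Nat.dvd_iff_mod_eq_zero.mp hdvd⟩
  calc ∑ k ∈ Finset.range (N - 1), (if N % (k + 1) = 0 then (k + 1) else 0)
      = ∑ k ∈ Finset.range (N - 1), (if N % (1 + k) = 0 then (1 + k) else 0) := by
        apply Finset.sum_congr rfl; intro k _; rw [Nat.add_comm]
    _ = ∑ d ∈ Finset.Ico 1 N, (if N % d = 0 then d else 0) := h1.symm
    _ = ∑ d ∈ Finset.filter (fun d => N % d = 0) (Finset.Ico 1 N), d := (Finset.sum_filter _ _).symm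
    _ = ∑ d ∈ N.properDivisors, d := by rw [h2]

theorem properSumAlt_eq (n : Int) :
    properSumAlt n = ((∑ d ∈ (n.toNat).properDivisors, d : Nat) : Int) := by
  unfold properSumAlt
  split_ifs with h
  · have : n.toNat = 0 ∨ n.toNat = 1 := by omega
    rcases this with h' | h' <;> simp [h']
  · rw [altGo_proper _ (by omega)]

theorem foldA_eq (n : Int) :
    ((PySem.List.pyRange 1 n 1).foldl
      (fun acc i => if PySem.Int.mod n i == 0 then acc ++ [i] else acc) []).sum
    = ((∑ d ∈ (n.toNat).properDivisors, d : Nat) : Int) := by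
  rw [PySem.List.foldl_append_if_eq_filter, PySem.List.pyRange_one, List.filter_map,
    List.nil_append, sum_filter_map_range]
  by_cases hn : n ≤ 1
  · have hm : (n - 1).toNat = 0 := by omega
    have : n.toNat = 0 ∨ n.toNat = 1 := by omega
    rcases this with h' | h' <;> simp [hm, h']
  · have hm : (n - 1).toNat = n.toNat - 1 := by omega
    rw [← rangeSum_proper n.toNat (by omega), Nat.cast_sum, hm]
    apply Finset.sum_congr rfl
    intro k _
    have hpos : (0:Int) < 1 + (k:Int) := by omega
    have hmod : PySem.Int.mod n (1 + (k:Int)) = ((n.toNat % (k + 1) : Nat) : Int) := by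
      rw [PySem.Int.mod_eq_emod_of_pos hpos,
        show n = ((n.toNat : Nat) : Int) by omega,
        show (1 + ((k:Nat):Int)) = ((k + 1 : Nat) : Int) by push_cast; ring]
      exact (Int.natCast_mod _ _).symm
    simp only [Function.comp, hmod]
    by_cases hk : n.toNat % (k + 1) = 0
    · rw [if_pos (by simp [hk]), if_pos hk]; push_cast; ring
    · rw [if_neg (by simp only [beq_iff_eq]; exact_mod_cast hk), if_neg hk]; simp

-- ===== VERDICT (by name: the statement is the Claim_ definition above) =====
theorem num_type_spec : Claim_equal_num_type := by
  intro num _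
  unfold Spec_num_type num_type num_type_alt
  simp only [foldA_eq, properSumAlt_eq]
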